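-- pv_equiv track=rewrite | github.com/owingit/frontalis_IF | analysis.py | calculate_intervals
-- ===== SOURCE A (Python) =====
-- def calculate_intervals(ts):
--     n = len(ts)
--
--     indices = []
--
--     for i in range(n):
--         if ts[i] == 1:
--             indices.append(i)
--
--     intervals = []
--     if len(indices) > 1:
--         for j in range(1, len(indices)):
--             intervals.append(indices[j] - indices[j - 1])
--
--     return intervals
-- ===== SOURCE B (Python) =====
-- def calculate_intervals(ts):
--     intervals = []
--     prev = None
--     for i, v in enumerate(ts):
--         if v == 1:
--             if prev is not None:
--                 intervals.append(i - prev)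
--             prev = i
--     return intervals
-- ===== Notes on version B (the rewrite author's own statement) =====
-- stated objective: simpler
-- what changed: Fuses A's two passes (collect all 1-indices, then difference them in a second indexed loop) into one enumerate pass that keeps only the previous 1-position as scalar state and emits each gap immediately.
import Mathlib
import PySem

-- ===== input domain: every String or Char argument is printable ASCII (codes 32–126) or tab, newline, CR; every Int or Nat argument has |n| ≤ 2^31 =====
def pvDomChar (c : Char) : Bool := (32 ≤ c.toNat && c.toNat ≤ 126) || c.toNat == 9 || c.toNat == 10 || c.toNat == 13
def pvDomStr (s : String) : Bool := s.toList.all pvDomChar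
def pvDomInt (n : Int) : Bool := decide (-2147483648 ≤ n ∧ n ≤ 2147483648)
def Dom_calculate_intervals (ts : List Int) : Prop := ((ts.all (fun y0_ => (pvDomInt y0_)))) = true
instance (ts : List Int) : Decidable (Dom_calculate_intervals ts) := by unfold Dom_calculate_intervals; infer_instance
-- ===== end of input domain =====

-- B fuses A's two passes (collect 1-indices, then difference them) into one pass keeping only the previous 1-position; objective: simpler.

-- ===== PORT A =====
def calculate_intervals (ts : List Int) : List Int :=
  let n : Int := ts.length
  let indices : List Int :=
    (PySem.List.pyRange 0 n 1).foldl
      (fun acc i => if PySem.List.pyGetD ts i 0 = 1 then acc ++ [i] else acc) []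
  if 1 < indices.length then
    (PySem.List.pyRange 1 (indices.length : Int) 1).foldl
      (fun acc j => acc ++ [PySem.List.pyGetD indices j 0 - PySem.List.pyGetD indices (j - 1) 0]) []
  else []

-- ===== PORT B =====
def calculate_intervals_alt (ts : List Int) : List Int :=
  ((PySem.List.enumerate ts 0).foldl
    (fun (st : List Int × Option Int) (p : Int × Int) =>
      if p.2 = 1 then
        ((match st.2 with
          | some prev => st.1 ++ [p.1 - prev]
          | none => st.1), some p.1)
      else st)
    ([], none)).1

-- ===== PRECONDITION & SPEC =====
def Spec_calculate_intervals (ts : List Int) (out : List Int) : Prop := out = calculate_intervals_alt ts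
instance (ts : List Int) (out : List Int) : Decidable (Spec_calculate_intervals ts out) := by unfold Spec_calculate_intervals; infer_instance

-- ===== CLAIM (what is proved, stated in full; the proofs are below) =====
def Claim_equal_calculate_intervals : Prop := ∀ (ts : List Int), Dom_calculate_intervals ts → Spec_calculate_intervals ts (calculate_intervals ts)

-- ===== LEMMAS AND PROOFS =====

-- positions (starting at s) of the elements equal to 1
def pvPos : List Int → Int → List Int
  | [], _ => []
  | x :: xs, s => if x = 1 then s :: pvPos xs (s + 1) else pvPos xs (s + 1)

-- adjacent differences
def pvAdj : List Int → List Int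
  | x :: y :: r => (y - x) :: pvAdj (y :: r)
  | _ => []

-- adjacent differences with a pending previous element
def pvCore : Option Int → List Int → List Int
  | none, [] => []
  | none, q :: r => pvCore (some q) r
  | some _, [] => []
  | some p, q :: r => (q - p) :: pvCore (some q) r

theorem pvCore_some (r : List Int) : ∀ p, pvCore (some p) r = pvAdj (p :: r) := by
  induction r with
  | nil => intro p; rfl
  | cons q r ih => intro p; simp [pvCore, pvAdj, ih]

theorem pvCore_none (l : List Int) : pvCore none l = pvAdj l := by
  cases l with
  | nil => rfl
  | cons q r => simp [pvCore, pvCore_some]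

theorem pvAdj_short (l : List Int) (h : ¬ 1 < l.length) : pvAdj l = [] := by
  match l, h with
  | [], _ => rfl
  | [x], _ => rfl
  | x :: y :: r, h => simp at h

theorem pvAdj_append (l : List Int) (y : Int) (h : l ≠ []) :
    pvAdj (l ++ [y]) = pvAdj l ++ [y - l.getD (l.length - 1) 0] := by
  induction l with
  | nil => simp at h
  | cons x r ih =>
    cases r with
    | nil => rfl
    | cons x2 r2 =>
      have hih := ih (by simp)
      simp only [List.cons_append] at hih ⊢
      simp [pvAdj, hih, List.getD]
      rfl

theorem foldA_pos (ts : List Int) : ∀ (s : Int) (acc : List Int),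
    (PySem.List.enumerate ts s).foldl
      (fun acc (p : Int × Int) => if p.2 = 1 then acc ++ [p.1] else acc) acc
    = acc ++ pvPos ts s := by
  induction ts with
  | nil => intro s acc; simp [PySem.List.enumerate_nil, pvPos]
  | cons x xs ih =>
    intro s acc
    rw [PySem.List.enumerate_cons]
    by_cases hx : x = 1 <;> simp [pvPos, hx, ih]

theorem foldB_core (ts : List Int) : ∀ (s : Int) (acc : List Int) (prev : Option Int),
    ((PySem.List.enumerate ts s).foldl
      (fun (st : List Int × Option Int) (p : Int × Int) =>
        if p.2 = 1 then
          ((match st.2 with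
            | some prev => st.1 ++ [p.1 - prev]
            | none => st.1), some p.1)
        else st)
      (acc, prev)).1
    = acc ++ pvCore prev (pvPos ts s) := by
  induction ts with
  | nil => intro s acc prev; cases prev <;> simp [PySem.List.enumerate_nil, pvPos, pvCore]
  | cons x xs ih =>
    intro s acc prev
    rw [PySem.List.enumerate_cons]
    by_cases hx : x = 1
    · cases prev with
      | none => simp [hx, pvPos, pvCore, ih]
      | some p => simp [hx, pvPos, pvCore, ih]
    · cases prev <;> simp [hx, pvPos, ih]

-- A's second loop over an arbitrary list computes the adjacent differences
theorem foldA2_adj (l : List Int) :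
    (PySem.List.pyRange 1 (l.length : Int) 1).foldl
      (fun acc j => acc ++ [PySem.List.pyGetD l j 0 - PySem.List.pyGetD l (j - 1) 0]) []
    = pvAdj l := by
  suffices h : ∀ (l : List Int) (acc : List Int),
      (PySem.List.pyRange 1 (l.length : Int) 1).foldl
        (fun acc j => acc ++ [PySem.List.pyGetD l j 0 - PySem.List.pyGetD l (j - 1) 0]) acc
      = acc ++ pvAdj l by simpa using h l []
  intro l
  induction l using List.reverseRecOn with
  | nil => intro acc; simp [PySem.List.pyRange_one_eq_nil, pvAdj]
  | append_singleton l y ih =>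
    intro acc
    by_cases hne : l = []
    · subst hne; simp [PySem.List.pyRange_one_eq_nil, pvAdj]
    · have hpos : 0 < l.length := List.length_pos_of_ne_nil hne
      have hlen2 : ((l ++ [y]).length : Int) = (l.length : Int) + 1 := by simp
      have hlen : (1 : Int) ≤ (l.length : Int) := by exact_mod_cast hpos
      rw [hlen2, PySem.List.pyRange_one_succ_right hlen, List.foldl_append]
      rw [PySem.List.foldl_congr_mem
            (PySem.List.pyRange 1 (l.length : Int) 1)
            (fun acc j => acc ++ [PySem.List.pyGetD (l ++ [y]) j 0 - PySem.List.pyGetD (l ++ [y]) (j - 1) 0])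
            (fun acc j => acc ++ [PySem.List.pyGetD l j 0 - PySem.List.pyGetD l (j - 1) 0])
            acc
            (by
              intro a2 j hj
              rw [PySem.List.mem_pyRange_one] at hj
              have e1 : PySem.List.pyGetD (l ++ [y]) j 0 = PySem.List.pyGetD l j 0 := by
                rw [PySem.List.pyGetD_eq_getElem (l ++ [y]) 0 (by omega) (by rw [hlen2]; omega),
                    PySem.List.pyGetD_eq_getElem l 0 (by omega) (by omega)]
                exact List.getElem_append_left (by omega)
              have e2 : PySem.List.pyGetD (l ++ [y]) (j - 1) 0 = PySem.List.pyGetD l (j - 1) 0 := by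
                rw [PySem.List.pyGetD_eq_getElem (l ++ [y]) 0 (by omega) (by rw [hlen2]; omega),
                    PySem.List.pyGetD_eq_getElem l 0 (by omega) (by omega)]
                exact List.getElem_append_left (by omega)
              simp [e1, e2])]
      rw [ih, pvAdj_append l y hne]
      have h1 : PySem.List.pyGetD (l ++ [y]) (l.length : Int) 0 = y := by
        rw [PySem.List.pyGetD_eq_getElem (l ++ [y]) 0 (by omega) (by rw [hlen2]; omega)]
        simp
      have h2 : PySem.List.pyGetD (l ++ [y]) ((l.length : Int) - 1) 0
          = l.getD (l.length - 1) 0 := by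
        rw [PySem.List.pyGetD_eq_getElem (l ++ [y]) 0 (by omega) (by rw [hlen2]; omega)]
        rw [List.getD_eq_getElem l 0 (by omega)]
        have ht : ((l.length : Int) - 1).toNat = l.length - 1 := by omega
        simp only [ht]
        rw [List.getElem_append_left (by omega)]
      simp [h1, h2]

theorem calc_eq (ts : List Int) : calculate_intervals ts = calculate_intervals_alt ts := by
  simp only [calculate_intervals, calculate_intervals_alt]
  have hA1 : (PySem.List.pyRange 0 ((ts.length : Int)) 1).foldl
      (fun acc i => if PySem.List.pyGetD ts i 0 = 1 then acc ++ [i] else acc) []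
      = pvPos ts 0 := by
    have h := foldA_pos ts 0 []
    rw [PySem.List.enumerate_eq_map_pyRange (d := (0 : Int)), List.foldl_map] at h
    simpa using h
  rw [foldB_core ts 0 [] none, pvCore_none, List.nil_append, hA1]
  by_cases h : 1 < (pvPos ts 0).length
  · rw [if_pos h, foldA2_adj]
  · rw [if_neg h, pvAdj_short _ h]

-- ===== VERDICT (by name: the statement is the Claim_ definition above) =====
theorem calculate_intervals_spec : Claim_equal_calculate_intervals := by
  intro ts _
  unfold Spec_calculate_intervals
  exact calc_eq ts
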